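-- pv_equiv track=rewrite | github.com/TheDarkLightX/ZenoDEX | tests/tau/check_formal_completeness.py | split_ternary
-- ===== SOURCE A (Python) =====
-- def split_ternary(expr):
--     depth = 0
--     qmark = None
--     for i, ch in enumerate(expr):
--         if ch == "(":
--             depth += 1
--         elif ch == ")":
--             depth -= 1
--         elif ch == "?" and depth == 0:
--             qmark = i
--             break
--     if qmark is None:
--         return None
--     depth = 0
--     colon = None
--     for j in range(qmark + 1, len(expr)):
--         ch = expr[j]
--         if ch == "(":
--             depth += 1
--         elif ch == ")":
--             depth -= 1
--         elif ch == ":" and depth == 0: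
--             colon = j
--             break
--     if colon is None:
--         return None
--     return expr[:qmark], expr[qmark + 1:colon], expr[colon + 1:]
-- ===== SOURCE B (Python) =====
-- def split_ternary(expr):
--     depth = 0
--     qmark = None
--     colon = None
--     for i, ch in enumerate(expr):
--         if ch == "(":
--             depth += 1
--         elif ch == ")":
--             depth -= 1
--         elif depth == 0 and ch == "?" and qmark is None:
--             qmark = i
--         elif depth == 0 and ch == ":" and qmark is not None:
--             colon = i
--             break
--     if qmark is None or colon is None:
--         return None
--     return expr[:qmark], expr[qmark + 1:colon], expr[colon + 1:]
-- ===== Notes on version B (the rewrite author's own statement) =====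
-- stated objective: simpler
-- what changed: Fuses A's two sequential scans (one finding the top-level question mark, a second restarted scan finding the colon) into a single continuous depth-tracking pass over enumerate(expr), exploiting that the depth counter is already zero at the question mark so no reset is needed.
import Mathlib
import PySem

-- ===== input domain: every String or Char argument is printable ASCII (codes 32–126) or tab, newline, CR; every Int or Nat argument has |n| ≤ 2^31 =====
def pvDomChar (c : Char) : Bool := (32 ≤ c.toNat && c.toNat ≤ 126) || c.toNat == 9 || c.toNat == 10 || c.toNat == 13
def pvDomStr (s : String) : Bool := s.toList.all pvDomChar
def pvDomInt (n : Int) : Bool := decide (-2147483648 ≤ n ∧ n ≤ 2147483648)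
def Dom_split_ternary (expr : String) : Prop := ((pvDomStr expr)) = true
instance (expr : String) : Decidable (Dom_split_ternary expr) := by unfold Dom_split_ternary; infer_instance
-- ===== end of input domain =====

-- B fuses A's two sequential scans into one continuous depth-tracking pass; objective: simpler.

-- ===== PORT A =====
-- first loop: find the first top-level '?'
def findQ : List Char → Int → Int → Option Int
  | [], _, _ => none
  | ch :: rest, i, depth =>
    if ch = '(' then findQ rest (i + 1) (depth + 1)
    else if ch = ')' then findQ rest (i + 1) (depth - 1)
    else if ch = '?' ∧ depth = 0 then some i
    else findQ rest (i + 1) depth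

-- second loop: 'for j in range(qmark+1, len(expr))' with expr[j]
def findC (s : List Char) : List Int → Int → Option Int
  | [], _ => none
  | j :: js, depth =>
    match PySem.List.pyGet? s j with
    | none => none
    | some ch =>
      if ch = '(' then findC s js (depth + 1)
      else if ch = ')' then findC s js (depth - 1)
      else if ch = ':' ∧ depth = 0 then some j
      else findC s js depth

def split_ternary (expr : String) : Option (String × String × String) :=
  let s := expr.toList
  match findQ s 0 0 with
  | none => none
  | some q =>
    match findC s (PySem.List.pyRange (q + 1) s.length 1) 0 with
    | none => none
    | some c =>
      some (String.ofList (PySem.List.slice s none (some q)),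
            String.ofList (PySem.List.slice s (some (q + 1)) (some c)),
            String.ofList (PySem.List.slice s (some (c + 1)) none))

-- ===== PORT B =====
-- single pass: track depth, remember qmark, stop at the matching top-level ':'
def scanB : List Char → Int → Int → Option Int → Option (Int × Int)
  | [], _, _, _ => none
  | ch :: rest, i, depth, q =>
    if ch = '(' then scanB rest (i + 1) (depth + 1) q
    else if ch = ')' then scanB rest (i + 1) (depth - 1) q
    else if depth = 0 ∧ ch = '?' ∧ q = none then scanB rest (i + 1) depth (some i)
    else if depth = 0 ∧ ch = ':' ∧ q ≠ none then q.map (fun qi => (qi, i))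
    else scanB rest (i + 1) depth q

def split_ternary_alt (expr : String) : Option (String × String × String) :=
  let s := expr.toList
  match scanB s 0 0 none with
  | none => none
  | some (q, c) =>
    some (String.ofList (PySem.List.slice s none (some q)),
          String.ofList (PySem.List.slice s (some (q + 1)) (some c)),
          String.ofList (PySem.List.slice s (some (c + 1)) none))

-- ===== PRECONDITION & SPEC =====
def Spec_split_ternary (expr : String) (out : Option (String × String × String)) : Prop := out = split_ternary_alt expr
instance (expr : String) (out : Option (String × String × String)) : Decidable (Spec_split_ternary expr out) := by unfold Spec_split_ternary; infer_instance

-- ===== CLAIM (what is proved, stated in full; the proofs are below) =====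
def Claim_equal_split_ternary : Prop := ∀ (expr : String), Dom_split_ternary expr → Spec_split_ternary expr (split_ternary expr)

-- ===== LEMMAS AND PROOFS =====

-- abstract colon scan over a suffix, with its absolute start index
def colScan : List Char → Int → Int → Option Int
  | [], _, _ => none
  | ch :: rest, j, depth =>
    if ch = '(' then colScan rest (j + 1) (depth + 1)
    else if ch = ')' then colScan rest (j + 1) (depth - 1)
    else if ch = ':' ∧ depth = 0 then some j
    else colScan rest (j + 1) depth

-- A's indexed second loop equals the structural colon scan over the suffix
theorem findC_eq_colScan : ∀ (post pre : List Char) (d : Int),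
    findC (pre ++ post) (PySem.List.pyRange (pre.length : Int) ((pre ++ post).length : Int) 1) d
      = colScan post (pre.length : Int) d := by
  intro post
  induction post with
  | nil =>
    intro pre d
    simp only [List.append_nil]
    rw [PySem.List.pyRange_one_eq_nil (le_refl _)]
    simp [findC, colScan]
  | cons ch rest ih =>
    intro pre d
    have hlt : (pre.length : Int) < (((pre ++ ch :: rest).length : Nat) : Int) := by
      simp
    rw [PySem.List.pyRange_one_cons hlt]
    have hget : PySem.List.pyGet? (pre ++ ch :: rest) (pre.length : Int) = some ch :=
      PySem.List.pyGet?_append_length pre rest ch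
    have ihx : ∀ d' : Int,
        findC (pre ++ ch :: rest) (PySem.List.pyRange ((pre.length : Int) + 1) (((pre ++ ch :: rest).length : Nat) : Int) 1) d'
          = colScan rest ((pre.length : Int) + 1) d' := by
      intro d'
      have := ih (pre ++ [ch]) d'
      simpa [List.append_assoc, Int.add_comm] using this
    simp only [findC, colScan, hget]
    split_ifs with h1 h2 h3
    · exact ihx (d + 1)
    · exact ihx (d - 1)
    · rfl
    · exact ihx d

-- B's scan with qmark already set equals the colon scan
theorem scanB_some : ∀ (suf : List Char) (j depth q : Int),
    scanB suf j depth (some q) = (colScan suf j depth).map (fun c => (q, c)) := by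
  intro suf
  induction suf with
  | nil => intro j depth q; simp [scanB, colScan]
  | cons ch rest ih =>
    intro j depth q
    simp only [scanB, colScan]
    split_ifs with h1 h2 h3 h4 h5 h6 h7 <;> simp_all [ih]

-- B's scan with no qmark yet, versus A's first loop
theorem scanB_none : ∀ (suf : List Char) (i depth : Int),
    (findQ suf i depth = none → scanB suf i depth none = none) ∧
    (∀ q, findQ suf i depth = some q →
      ∃ pre post, suf = pre ++ '?' :: post ∧ q = i + (pre.length : Int) ∧
        scanB suf i depth none = (colScan post (q + 1) 0).map (fun c => (q, c))) := by
  intro suf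
  induction suf with
  | nil => intro i depth; exact ⟨fun _ => rfl, fun q h => by simp [findQ] at h⟩
  | cons ch rest ih =>
    intro i depth
    by_cases h1 : ch = '(' 
    · refine ⟨fun h => ?_, fun q h => ?_⟩
      · simp only [findQ, h1, if_pos rfl] at h
        simp only [scanB, h1, if_pos rfl]
        exact (ih (i + 1) (depth + 1)).1 h
      · simp only [findQ, h1, if_pos rfl] at h
        obtain ⟨pre, post, hs, hq, hscan⟩ := (ih (i + 1) (depth + 1)).2 q h
        refine ⟨ch :: pre, post, by simp [hs], by simp [hq]; omega, ?_⟩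
        simp only [scanB, h1, if_pos rfl]
        exact hscan
    · by_cases h2 : ch = ')'
      · refine ⟨fun h => ?_, fun q h => ?_⟩
        · simp only [findQ, h1, h2, if_neg, if_pos rfl] at h
          simp only [scanB, h1, h2, if_neg, if_pos rfl]
          exact (ih (i + 1) (depth - 1)).1 h
        · simp only [findQ, h1, h2, if_neg, if_pos rfl] at h
          obtain ⟨pre, post, hs, hq, hscan⟩ := (ih (i + 1) (depth - 1)).2 q h
          refine ⟨ch :: pre, post, by simp [hs], by simp [hq]; omega, ?_⟩
          simp only [scanB, h1, h2, if_neg, if_pos rfl]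
          exact hscan
      · by_cases h3 : ch = '?' ∧ depth = 0
        · refine ⟨fun h => ?_, fun q h => ?_⟩
          · simp [findQ, h1, h2, h3] at h
          · simp only [findQ] at h
            rw [if_neg (by simp [h1]), if_neg (by simp [h2]), if_pos h3] at h
            refine ⟨[], rest, by simp [h3.1], by simpa using h.symm, ?_⟩
            simp only [scanB]
            rw [if_neg (by simp [h3.1, h1]), if_neg (by simp [h3.1, h2]),
                if_pos (by simp [h3.1, h3.2])]
            rw [scanB_some rest (i + 1) depth i]
            injection h with h
            subst h
            rw [h3.2]
        · refine ⟨fun h => ?_, fun q h => ?_⟩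
          · simp only [findQ] at h
            rw [if_neg (by simp [h1]), if_neg (by simp [h2]), if_neg h3] at h
            simp only [scanB]
            rw [if_neg (by simp [h1]), if_neg (by simp [h2]),
                if_neg (by intro hx; exact h3 ⟨hx.2.1, hx.1⟩), if_neg (by simp)]
            exact (ih (i + 1) depth).1 h
          · simp only [findQ] at h
            rw [if_neg (by simp [h1]), if_neg (by simp [h2]), if_neg h3] at h
            obtain ⟨pre, post, hs, hq, hscan⟩ := (ih (i + 1) depth).2 q h
            refine ⟨ch :: pre, post, by simp [hs], by simp [hq]; omega, ?_⟩
            simp only [scanB]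
            rw [if_neg (by simp [h1]), if_neg (by simp [h2]),
                if_neg (by intro hx; exact h3 ⟨hx.2.1, hx.1⟩), if_neg (by simp)]
            exact hscan

-- ===== VERDICT (by name: the statement is the Claim_ definition above) =====
theorem split_ternary_spec : Claim_equal_split_ternary := by
  intro expr _
  unfold Spec_split_ternary split_ternary split_ternary_alt
  dsimp only
  cases hq : findQ expr.toList 0 0 with
  | none =>
    rw [(scanB_none expr.toList 0 0).1 hq]
  | some q =>
    obtain ⟨pre, post, hs, hqv, hscan⟩ := (scanB_none expr.toList 0 0).2 q hq
    have hq1 : q + 1 = (((pre ++ ['?']).length : Nat) : Int) := by simp [hqv]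
    have hsplit : expr.toList = (pre ++ ['?']) ++ post := by simp [hs]
    have hA : findC expr.toList (PySem.List.pyRange (q + 1) (expr.toList.length : Int) 1) 0
        = colScan post (q + 1) 0 := by
      rw [hq1, hsplit]
      exact findC_eq_colScan post (pre ++ ['?']) 0
    dsimp only
    rw [hscan, hA]
    cases colScan post (q + 1) 0 <;> rfl
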